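-- pv_equiv track=rewrite | github.com/nolaneloiodice/controlhub-ai | controlhub/pages/today.py | format_items_for_prompt
-- ===== SOURCE A (Python) =====
-- def get_priority_score(item):
--     priority = item.get("priority", "moyenne")
--
--     if priority == "haute":
--         return 3
--
--     if priority == "moyenne":
--         return 2
--
--     return 1
--
-- def format_items_for_prompt(title, items, limit=6):
--     lines = [title]
--
--     if not items:
--         lines.append("- Aucun élément.")
--         return "\n".join(lines)
--
--     sorted_items = sorted(
--         items,
--         key=get_priority_score,
--         reverse=True,
--     )
--
--     for item in sorted_items[:limit]:
--         description = item.get("description", item.get("context", ""))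
--
--         lines.append(
--             f"- {item.get('title', item.get('name', 'Sans titre'))} "
--             f"| priorité : {item.get('priority', 'non définie')} "
--             f"| statut : {item.get('status', 'non défini')} "
--             f"| description : {description[:500]}"
--         )
--
--     return "\n".join(lines)
-- ===== SOURCE B (Python) =====
-- def format_items_for_prompt(title, items, limit=6):
--     if not items:
--         return "\n".join([title, "- Aucun élément."])
--
--     # single-pass bucket sort over the three priority levels (stable, high->low)
--     haute, moyenne, basse = [], [], []
--     for item in items:
--         p = item.get("priority", "moyenne")
--         if p == "haute":
--             haute.append(item)
--         elif p == "moyenne":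
--             moyenne.append(item)
--         else:
--             basse.append(item)
--     ordered = haute + moyenne + basse
--
--     parts = [title]
--     for item in ordered[:limit]:
--         description = item.get("description", item.get("context", ""))
--         parts.append(
--             "- %s | priorité : %s | statut : %s | description : %s" % (
--                 item.get("title", item.get("name", "Sans titre")),
--                 item.get("priority", "non définie"),
--                 item.get("status", "non défini"),
--                 description[:500],
--             )
--         )
--     return "\n".join(parts)
-- ===== Notes on version B (the rewrite author's own statement) =====
-- stated objective: alternative
-- what changed: Replaces the comparison sort (sorted with key/reverse) by a single-pass stable bucket sort into three priority lists concatenated high-to-low, keeping the identical formatting and slicing.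
import Mathlib
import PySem

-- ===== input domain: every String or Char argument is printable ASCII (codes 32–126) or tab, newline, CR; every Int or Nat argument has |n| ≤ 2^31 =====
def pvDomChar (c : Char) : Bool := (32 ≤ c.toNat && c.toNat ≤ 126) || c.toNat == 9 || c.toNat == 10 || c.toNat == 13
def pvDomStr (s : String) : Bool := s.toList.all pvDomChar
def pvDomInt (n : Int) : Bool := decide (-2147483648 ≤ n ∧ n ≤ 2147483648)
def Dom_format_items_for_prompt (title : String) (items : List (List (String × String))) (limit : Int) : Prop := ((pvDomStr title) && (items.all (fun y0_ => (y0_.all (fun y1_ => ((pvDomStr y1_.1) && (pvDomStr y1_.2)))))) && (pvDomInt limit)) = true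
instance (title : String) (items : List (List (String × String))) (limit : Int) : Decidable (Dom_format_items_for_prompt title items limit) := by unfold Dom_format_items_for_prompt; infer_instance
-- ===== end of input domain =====

-- B replaces A's comparison sort by a single-pass stable bucket sort over the three priority levels; formatting is unchanged.

-- shared formatting helper (both Pythons build this exact line per item)
def pvItemLine (item : List (String × String)) : String :=
  let description := PySem.Dict.getD ⟨item⟩ "description" (PySem.Dict.getD ⟨item⟩ "context" "")
  "- " ++ PySem.Dict.getD ⟨item⟩ "title" (PySem.Dict.getD ⟨item⟩ "name" "Sans titre")
    ++ " | priorité : " ++ PySem.Dict.getD ⟨item⟩ "priority" "non définie"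
    ++ " | statut : " ++ PySem.Dict.getD ⟨item⟩ "status" "non défini"
    ++ " | description : " ++ PySem.Str.slice description none (some 500)

-- ===== PORT A =====
def get_priority_score (item : List (String × String)) : Int :=
  -- 'priority' inlined: priority = item.get("priority", "moyenne")
  if PySem.Dict.getD ⟨item⟩ "priority" "moyenne" == "haute" then 3
  else if PySem.Dict.getD ⟨item⟩ "priority" "moyenne" == "moyenne" then 2
  else 1

def format_items_for_prompt (title : String) (items : List (List (String × String))) (limit : Int) : String :=
  let lines : List String := [title]
  if items = [] then
    PySem.Str.join "\n" (lines ++ ["- Aucun élément."])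
  else
    let sorted_items := PySem.List.sorted items get_priority_score true
    let lines := (PySem.List.slice sorted_items none (some limit)).foldl
      (fun ls item => ls ++ [pvItemLine item]) lines
    PySem.Str.join "\n" lines

-- ===== PORT B =====
def pvPrio (item : List (String × String)) : String :=
  PySem.Dict.getD ⟨item⟩ "priority" "moyenne"

def pvBuckets (items : List (List (String × String))) :
    List (List (String × String)) × List (List (String × String)) × List (List (String × String)) :=
  items.foldl
    (fun acc item =>
      let p := pvPrio item
      if p == "haute" then (acc.1 ++ [item], acc.2.1, acc.2.2)
      else if p == "moyenne" then (acc.1, acc.2.1 ++ [item], acc.2.2)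
      else (acc.1, acc.2.1, acc.2.2 ++ [item]))
    ([], [], [])

def format_items_for_prompt_alt (title : String) (items : List (List (String × String))) (limit : Int) : String :=
  if items = [] then
    PySem.Str.join "\n" [title, "- Aucun élément."]
  else
    let b := pvBuckets items
    let ordered := b.1 ++ b.2.1 ++ b.2.2
    let parts := title :: (PySem.List.slice ordered none (some limit)).map pvItemLine
    PySem.Str.join "\n" parts

-- ===== PRECONDITION & SPEC =====
def Spec_format_items_for_prompt (title : String) (items : List (List (String × String))) (limit : Int) (out : String) : Prop := out = format_items_for_prompt_alt title items limit
instance (title : String) (items : List (List (String × String))) (limit : Int) (out : String) : Decidable (Spec_format_items_for_prompt title items limit out) := by unfold Spec_format_items_for_prompt; infer_instance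

-- ===== CLAIM (what is proved, stated in full; the proofs are below) =====
def Claim_equal_format_items_for_prompt : Prop := ∀ (title : String) (items : List (List (String × String))) (limit : Int), Dom_format_items_for_prompt title items limit → Spec_format_items_for_prompt title items limit (format_items_for_prompt title items limit)

-- ===== LEMMAS AND PROOFS =====

theorem foldl_app_map {α : Type} (f : α → String) :
    ∀ (l : List α) (init : List String),
      l.foldl (fun ls i => ls ++ [f i]) init = init ++ l.map f
  | [], init => by simp
  | x :: l, init => by
      simp only [List.foldl_cons, List.map_cons]
      rw [foldl_app_map f l]
      simp

theorem insertBy_all_true {α : Type} (before : α → α → Bool) (x : α) (bs : List α)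
    (h : ∀ a ∈ bs, before x a = true) : PySem.List.insertBy before x bs = x :: bs := by
  cases bs with
  | nil => rfl
  | cons b t => simp [PySem.List.insertBy, h b (by simp)]

theorem insertBy_all_false {α : Type} (before : α → α → Bool) (x : α) :
    ∀ (bs : List α), (∀ a ∈ bs, before x a = false) →
      PySem.List.insertBy before x bs = bs ++ [x]
  | [], _ => rfl
  | b :: t, h => by
      simp only [PySem.List.insertBy, h b (by simp)]
      rw [insertBy_all_false before x t (fun a ha => h a (by simp [ha]))]
      simp

theorem insertBy_append_left {α : Type} (before : α → α → Bool) (x : α) :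
    ∀ (as bs : List α), (∀ a ∈ as, before x a = false) →
      PySem.List.insertBy before x (as ++ bs) = as ++ PySem.List.insertBy before x bs
  | [], bs, _ => rfl
  | a :: t, bs, h => by
      simp only [List.cons_append, PySem.List.insertBy, h a (by simp)]
      rw [insertBy_append_left before x t bs (fun y hy => h y (by simp [hy]))]
      simp

theorem score_cases (i : List (String × String)) :
    get_priority_score i = 3 ∨ get_priority_score i = 2 ∨ get_priority_score i = 1 := by
  unfold get_priority_score
  split_ifs <;> simp

theorem sorted_buckets (items : List (List (String × String))) :
    PySem.List.sorted items get_priority_score true =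
      items.filter (fun i => get_priority_score i == 3)
        ++ items.filter (fun i => get_priority_score i == 2)
        ++ items.filter (fun i => get_priority_score i == 1) := by
  rw [PySem.List.sorted_rev_eq_foldl_insertBy]
  induction items using List.reverseRecOn with
  | nil => rfl
  | append_singleton xs x ih =>
    rw [List.foldl_append, List.foldl_cons, List.foldl_nil, ih]
    simp only [List.filter_append, List.filter_cons, List.filter_nil]
    set before : List (String × String) → List (String × String) → Bool :=
      fun a b => decide (get_priority_score b < get_priority_score a) with hbef
    have hmem3 : ∀ a ∈ xs.filter (fun i => get_priority_score i == 3), get_priority_score a = 3 := by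
      intro a ha; have := List.of_mem_filter ha; simpa using this
    have hmem2 : ∀ a ∈ xs.filter (fun i => get_priority_score i == 2), get_priority_score a = 2 := by
      intro a ha; have := List.of_mem_filter ha; simpa using this
    have hmem1 : ∀ a ∈ xs.filter (fun i => get_priority_score i == 1), get_priority_score a = 1 := by
      intro a ha; have := List.of_mem_filter ha; simpa using this
    rcases score_cases x with hx | hx | hx
    · have hge : ∀ a ∈ xs.filter (fun i => get_priority_score i == 3), before x a = false := by
        intro a ha; simp [hbef, hmem3 a ha, hx]
      have hlt : ∀ a ∈ xs.filter (fun i => get_priority_score i == 2)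
          ++ xs.filter (fun i => get_priority_score i == 1), before x a = true := by
        intro a ha
        rcases List.mem_append.1 ha with h | h
        · simp [hbef, hmem2 a h, hx]
        · simp [hbef, hmem1 a h, hx]
      rw [List.append_assoc, insertBy_append_left before x _ _ hge,
          insertBy_all_true before x _ hlt]
      simp [hx]
    · have hge : ∀ a ∈ xs.filter (fun i => get_priority_score i == 3)
          ++ xs.filter (fun i => get_priority_score i == 2), before x a = false := by
        intro a ha
        rcases List.mem_append.1 ha with h | h
        · simp [hbef, hmem3 a h, hx]
        · simp [hbef, hmem2 a h, hx]
      have hlt : ∀ a ∈ xs.filter (fun i => get_priority_score i == 1), before x a = true := by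
        intro a ha; simp [hbef, hmem1 a ha, hx]
      rw [insertBy_append_left before x _ _ hge, insertBy_all_true before x _ hlt]
      simp [hx]
    · have hge : ∀ a ∈ xs.filter (fun i => get_priority_score i == 3)
          ++ xs.filter (fun i => get_priority_score i == 2)
          ++ xs.filter (fun i => get_priority_score i == 1), before x a = false := by
        intro a ha
        rcases List.mem_append.1 ha with h | h
        · rcases List.mem_append.1 h with h2 | h2
          · simp [hbef, hmem3 a h2, hx]
          · simp [hbef, hmem2 a h2, hx]
        · simp [hbef, hmem1 a h, hx]
      rw [insertBy_all_false before x _ hge]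
      simp [hx]

theorem buckets_step (items : List (List (String × String))) :
    ∀ (h m l : List (List (String × String))),
      items.foldl
        (fun acc item =>
          let p := pvPrio item
          if p == "haute" then (acc.1 ++ [item], acc.2.1, acc.2.2)
          else if p == "moyenne" then (acc.1, acc.2.1 ++ [item], acc.2.2)
          else (acc.1, acc.2.1, acc.2.2 ++ [item]))
        (h, m, l) =
      (h ++ items.filter (fun i => pvPrio i == "haute"),
       m ++ items.filter (fun i => pvPrio i == "moyenne"),
       l ++ items.filter (fun i => !(pvPrio i == "haute") && !(pvPrio i == "moyenne"))) := by
  induction items with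
  | nil => intro h m l; simp
  | cons x xs ih =>
    intro h m l
    simp only [List.foldl_cons, List.filter_cons]
    by_cases hh : pvPrio x == "haute"
    · have hm : (pvPrio x == "moyenne") = false := by
        have : pvPrio x = "haute" := by simpa using hh
        simp [this]
      simp only [hh, hm, if_pos, Bool.not_false, Bool.not_true, Bool.false_and]
      rw [ih]
      simp
    · by_cases hm : pvPrio x == "moyenne"
      · simp only [hh, hm, if_pos, Bool.not_false, Bool.not_true, Bool.and_false]
        rw [ih]
        simp
      · simp only [hh, hm, Bool.not_false]
        rw [ih]
        simp

theorem score3_iff (i : List (String × String)) :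
    (get_priority_score i == 3) = (pvPrio i == "haute") := by
  unfold get_priority_score pvPrio
  split_ifs with h1 h2 <;> simp_all

theorem score2_iff (i : List (String × String)) :
    (get_priority_score i == 2) = (pvPrio i == "moyenne") := by
  unfold get_priority_score pvPrio
  split_ifs with h1 h2 <;> simp_all

theorem score1_iff (i : List (String × String)) :
    (get_priority_score i == 1) = (!(pvPrio i == "haute") && !(pvPrio i == "moyenne")) := by
  unfold get_priority_score pvPrio
  split_ifs with h1 h2 <;> simp_all

theorem ordered_eq_sorted (items : List (List (String × String))) :
    (pvBuckets items).1 ++ (pvBuckets items).2.1 ++ (pvBuckets items).2.2 =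
      PySem.List.sorted items get_priority_score true := by
  unfold pvBuckets
  rw [buckets_step items [] [] [], sorted_buckets]
  simp only [List.nil_append, List.append_assoc]
  congr 1
  · exact List.filter_congr (fun i _ => (score3_iff i).symm)
  congr 1
  · exact List.filter_congr (fun i _ => (score2_iff i).symm)
  · exact List.filter_congr (fun i _ => (score1_iff i).symm)

-- ===== VERDICT (by name: the statement is the Claim_ definition above) =====
theorem format_items_for_prompt_spec : Claim_equal_format_items_for_prompt := by
  intro title items limit _
  unfold Spec_format_items_for_prompt format_items_for_prompt format_items_for_prompt_alt
  by_cases h : items = []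
  · simp [h]
  · simp only [if_neg h]
    rw [foldl_app_map, ordered_eq_sorted]
    simp
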